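-- pv_equiv track=rewrite | github.com/obarakkyo/graduation | practice/clearnware_split.py | create_api_features
-- ===== SOURCE A (Python) =====
-- def create_api_features(behavior_json, maxnum=100):
--     get_list = []
--     for _, thread_id in enumerate(behavior_json["apistats"]):
--         api_json = behavior_json["apistats"][thread_id]
--         for _, apiname in enumerate(api_json):
--             for i in range(api_json[apiname]):
--                 if len(get_list) == 100:
--                     break
--                 get_list.append(apiname)
--     api_dict = {"apis":get_list}
--     return api_dict
-- ===== SOURCE B (Python) =====
-- def create_api_features(behavior_json, maxnum=100):
--     get_list = []
--     remaining = 100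
--     apistats = behavior_json["apistats"]
--     for thread_id in apistats:
--         api_json = apistats[thread_id]
--         for apiname in api_json:
--             take = min(api_json[apiname], remaining)
--             if take > 0:
--                 get_list += [apiname] * take
--                 remaining -= take
--             if remaining == 0:
--                 return {"apis": get_list}
--     return {"apis": get_list}
-- ===== Notes on version B (the rewrite author's own statement) =====
-- stated objective: alternative
-- what changed: Replaces A's per-element appends guarded by a 'len(get_list) == 100' check (and an inner range loop over each count) by budget arithmetic: B keeps a remaining counter, appends min(count, remaining) copies of each name in one bulk extend, and returns early the moment the budget reaches zero.
import Mathlib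
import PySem

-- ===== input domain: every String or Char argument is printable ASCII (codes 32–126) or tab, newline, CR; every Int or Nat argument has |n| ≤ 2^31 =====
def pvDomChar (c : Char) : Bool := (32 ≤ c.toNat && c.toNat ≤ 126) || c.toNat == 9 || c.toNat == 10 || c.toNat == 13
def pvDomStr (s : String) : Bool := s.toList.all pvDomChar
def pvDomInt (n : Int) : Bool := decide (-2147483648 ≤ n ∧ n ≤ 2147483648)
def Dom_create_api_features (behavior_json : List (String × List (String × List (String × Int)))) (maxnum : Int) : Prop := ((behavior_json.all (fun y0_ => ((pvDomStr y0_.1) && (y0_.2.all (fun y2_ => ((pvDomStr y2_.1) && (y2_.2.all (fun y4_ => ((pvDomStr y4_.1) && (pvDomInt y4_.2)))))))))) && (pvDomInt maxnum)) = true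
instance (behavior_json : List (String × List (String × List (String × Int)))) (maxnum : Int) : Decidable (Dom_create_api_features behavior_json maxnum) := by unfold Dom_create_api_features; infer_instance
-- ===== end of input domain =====

-- B replaces A's per-element appends guarded by 'len == 100' with budget arithmetic:
-- it keeps a remaining count, appends min(count, remaining) copies in bulk and returns
-- early when the budget is exhausted (alternative decomposition; same returned dict).

-- Python dict indexing d[k] on an association list: first match (none = KeyError).
def pyLookup {α : Type} (d : List (String × α)) (k : String) : Option α :=
  (d.find? (fun p => p.1 == k)).map (·.2)

-- ===== PORT A =====
-- literal transliteration: three nested loops, break modelled as a no-op once the length is 100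
def create_api_features (behavior_json : List (String × List (String × List (String × Int)))) (maxnum : Int) : List (String × List String) :=
  match pyLookup behavior_json "apistats" with
  | none => []   -- KeyError in Python; excluded by Pre_
  | some apistats =>
    let get_list : List String :=
      apistats.foldl (fun acc p =>
        match pyLookup apistats p.1 with
        | none => acc
        | some api_json =>
          api_json.foldl (fun acc2 q =>
            match pyLookup api_json q.1 with
            | none => acc2
            | some cnt =>
              (PySem.List.pyRange 0 cnt 1).foldl
                (fun acc3 _ => if acc3.length == 100 then acc3 else acc3 ++ [q.1]) acc2) acc) []
    [("apis", get_list)]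

-- ===== PORT B =====
-- Source B's inner loop: budget r, take = min(count, remaining), bulk append, early return at r' = 0
def altInner (full : List (String × Int)) (l : List (String × Int)) (gl : List String) (r : Int) : List String × Int :=
  match l with
  | [] => (gl, r)
  | q :: rest =>
    let take := min ((pyLookup full q.1).getD 0) r
    let gl' := if 0 < take then gl ++ List.replicate take.toNat q.1 else gl
    let r' := if 0 < take then r - take else r
    if r' = 0 then (gl', r') else altInner full rest gl' r'

-- Source B's outer loop over thread ids; stops as soon as the budget hit zero (the early return)
def altOuter (apistats : List (String × List (String × Int))) (l : List (String × List (String × Int))) (gl : List String) (r : Int) : List String :=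
  match l with
  | [] => gl
  | p :: rest =>
    match pyLookup apistats p.1 with
    | none => altOuter apistats rest gl r   -- unreachable KeyError branch
    | some api_json =>
      let res := altInner api_json api_json gl r
      if res.2 = 0 then res.1 else altOuter apistats rest res.1 res.2

def create_api_features_alt (behavior_json : List (String × List (String × List (String × Int)))) (maxnum : Int) : List (String × List String) :=
  match pyLookup behavior_json "apistats" with
  | none => []   -- KeyError in Python; excluded by Pre_
  | some apistats => [("apis", altOuter apistats apistats [] 100)]

-- ===== PRECONDITION & SPEC =====
-- Pre_ excludes exactly the inputs without an "apistats" key, on which the Python A raises KeyError.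
def Pre_create_api_features (behavior_json : List (String × List (String × List (String × Int)))) (maxnum : Int) : Prop :=
  (behavior_json.any (fun p => p.1 == "apistats")) = true
instance (behavior_json : List (String × List (String × List (String × Int)))) (maxnum : Int) : Decidable (Pre_create_api_features behavior_json maxnum) := by unfold Pre_create_api_features; infer_instance

def pvWitness_create_api_features : (List (String × List (String × List (String × Int)))) × Int :=
  ([("apistats", [("t1", [("a", 2), ("b", 1)])])], 100)

def Spec_create_api_features (behavior_json : List (String × List (String × List (String × Int)))) (maxnum : Int) (out : List (String × List String)) : Prop := out = create_api_features_alt behavior_json maxnum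
instance (behavior_json : List (String × List (String × List (String × Int)))) (maxnum : Int) (out : List (String × List String)) : Decidable (Spec_create_api_features behavior_json maxnum out) := by unfold Spec_create_api_features; infer_instance

-- ===== CLAIM (what is proved, stated in full; the proofs are below) =====
def Claim_equal_create_api_features : Prop := ∀ (behavior_json : List (String × List (String × List (String × Int)))) (maxnum : Int), Dom_create_api_features behavior_json maxnum → Pre_create_api_features behavior_json maxnum → Spec_create_api_features behavior_json maxnum (create_api_features behavior_json maxnum)

-- ===== LEMMAS AND PROOFS =====

-- the uncapped inner flatten (one thread's repeated names) and the outer flatten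
def innerFlat (full : List (String × Int)) (l : List (String × Int)) : List String :=
  l.flatMap (fun q =>
    match pyLookup full q.1 with
    | none => []
    | some cnt => List.replicate cnt.toNat q.1)

def outerFlat (apistats : List (String × List (String × Int))) (l : List (String × List (String × Int))) : List String :=
  l.flatMap (fun p =>
    match pyLookup apistats p.1 with
    | none => []
    | some api_json => innerFlat api_json api_json)

-- capped append: append s to a, truncated so that the result never exceeds 100 elements
def capApp (a s : List String) : List String := a ++ s.take (100 - a.length)

theorem capApp_length (a s : List String) (h : a.length ≤ 100) : (capApp a s).length ≤ 100 := by
  simp [capApp]; omega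

theorem capApp_capApp (a s t : List String) :
    capApp (capApp a s) t = capApp a (s ++ t) := by
  unfold capApp
  have h : 100 - (a ++ s.take (100 - a.length)).length
         = (100 - a.length) - s.length := by
    simp; omega
  rw [h, List.take_append]
  simp [List.append_assoc]

theorem foldl_capApp {β : Type} (f : List String → β → List String) (G : β → List String)
    (hf : ∀ a b, a.length ≤ 100 → f a b = capApp a (G b)) :
    ∀ (l : List β) (a : List String), a.length ≤ 100 →
      l.foldl f a = capApp a (l.flatMap G) := by
  intro l
  induction l with
  | nil => intro a _; simp [capApp]
  | cons b l ih =>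
      intro a ha
      simp only [List.foldl_cons, List.flatMap_cons]
      rw [hf a b ha, ih _ (capApp_length a (G b) ha), capApp_capApp]

theorem flatMap_const_singleton {β : Type} (name : String) (l : List β) :
    l.flatMap (fun _ => [name]) = List.replicate l.length name := by
  induction l with
  | nil => rfl
  | cons x l ih => simp [List.flatMap_cons, ih, List.replicate_succ]

-- A's innermost range loop with the break guard is a capped append of replicated names
theorem rangefold_eq (name : String) (l : List Int) (a : List String) (ha : a.length ≤ 100) :
    l.foldl (fun acc3 _ => if acc3.length == 100 then acc3 else acc3 ++ [name]) a
      = capApp a (List.replicate l.length name) := by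
  rw [← flatMap_const_singleton name l]
  refine foldl_capApp _ _ ?_ l a ha
  intro a _ ha
  by_cases h : a.length = 100
  · simp [capApp, h]
  · rw [if_neg (by simpa using h)]
    unfold capApp
    rw [List.take_of_length_le (by simp; omega)]

theorem get_list_eq (apistats : List (String × List (String × Int))) :
    apistats.foldl (fun acc p =>
        match pyLookup apistats p.1 with
        | none => acc
        | some api_json =>
          api_json.foldl (fun acc2 q =>
            match pyLookup api_json q.1 with
            | none => acc2
            | some cnt =>
              (PySem.List.pyRange 0 cnt 1).foldl
                (fun acc3 _ => if acc3.length == 100 then acc3 else acc3 ++ [q.1]) acc2) acc) []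
      = (outerFlat apistats apistats).take 100 := by
  have inner : ∀ (api_json : List (String × Int)) (a : List String),
      a.length ≤ 100 →
      api_json.foldl (fun acc2 q =>
        match pyLookup api_json q.1 with
        | none => acc2
        | some cnt =>
          (PySem.List.pyRange 0 cnt 1).foldl
            (fun acc3 _ => if acc3.length == 100 then acc3 else acc3 ++ [q.1]) acc2) a
        = capApp a (innerFlat api_json api_json) := by
    intro api_json a ha
    refine foldl_capApp _ _ ?_ api_json a ha
    intro a q ha
    cases hq : pyLookup api_json q.1 with
    | none => simp only [hq]; simp [capApp]
    | some cnt =>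
        simp only [hq]
        rw [rangefold_eq q.1 _ a ha, PySem.List.length_pyRange_one]
        simp
  have outer := foldl_capApp
    (fun acc p =>
        match pyLookup apistats p.1 with
        | none => acc
        | some api_json =>
          api_json.foldl (fun acc2 q =>
            match pyLookup api_json q.1 with
            | none => acc2
            | some cnt =>
              (PySem.List.pyRange 0 cnt 1).foldl
                (fun acc3 _ => if acc3.length == 100 then acc3 else acc3 ++ [q.1]) acc2) acc)
    (fun p =>
        match pyLookup apistats p.1 with
        | none => []
        | some api_json => innerFlat api_json api_json)
    (by
      intro a p ha
      cases hp : pyLookup apistats p.1 with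
      | none => simp only [hp]; simp [capApp]
      | some api_json => simp only [hp]; exact inner api_json a ha)
    apistats [] (by simp)
  simpa [capApp, outerFlat] using outer

-- B's inner loop computes a budget-limited take of the uncapped flatten
theorem altInner_eq (full : List (String × Int)) :
    ∀ (l : List (String × Int)) (gl : List String) (r : Int), 0 ≤ r →
      altInner full l gl r
        = (gl ++ (innerFlat full l).take r.toNat,
           r - ((innerFlat full l).length ⊓ r.toNat : ℕ)) := by
  intro l
  induction l with
  | nil => intro gl r hr; simp [altInner, innerFlat]
  | cons q rest ih =>
      intro gl r hr
      simp only [altInner, innerFlat, List.flatMap_cons]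
      cases hq : pyLookup full q.1 with
      | none =>
          have htake : ¬ (0 < min (0:Int) r) := by omega
          simp only [Option.getD_none, if_neg htake]
          by_cases hr0 : r = 0
          · subst hr0; simp
          · rw [if_neg hr0, ih gl r hr]
            simp [innerFlat]
      | some cnt =>
          simp only [Option.getD_some]
          by_cases hr0 : r = 0
          · subst hr0
            have : ¬ (0 < min cnt (0:Int)) := by omega
            simp [this]
          · have hrpos : 0 < r := lt_of_le_of_ne hr (Ne.symm hr0)
            by_cases hc : cnt ≤ 0
            · have : ¬ (0 < min cnt r) := by omega
              rw [if_neg this, if_neg this, if_neg hr0, ih gl r hr]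
              have : cnt.toNat = 0 := by omega
              simp [this, innerFlat]
            · push_neg at hc
              have htake : 0 < min cnt r := by omega
              rw [if_pos htake, if_pos htake]
              by_cases hr' : r - min cnt r = 0
              · -- budget exhausted here: r ≤ cnt
                have hrc : r ≤ cnt := by omega
                rw [if_pos hr']
                have h1 : (min cnt r).toNat = r.toNat := by omega
                have h2 : r.toNat ≤ cnt.toNat := by omega
                simp only [Prod.mk.injEq]
                constructor
                · rw [List.take_append]
                  simp [h1, List.take_replicate, Nat.min_eq_right h2, Nat.sub_eq_zero_of_le h2]
                  omega
                · simp only [List.length_append, List.length_replicate, innerFlat]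
                  omega
              · -- cnt < r: take = cnt, continue with the rest
                have hcr : cnt < r := by omega
                have hmin : min cnt r = cnt := by omega
                rw [if_neg hr', ih _ _ (by omega)]
                have h1 : (r - min cnt r).toNat = r.toNat - cnt.toNat := by omega
                simp only [Prod.mk.injEq]
                constructor
                · have h2 : (r - cnt).toNat = r.toNat - cnt.toNat := by omega
                  have h3 : min r.toNat cnt.toNat = cnt.toNat := by omega
                  rw [List.take_append]
                  simp [hmin, List.take_replicate, List.append_assoc, h2, h3, innerFlat]
                · simp only [List.length_append, List.length_replicate, innerFlat]
                  omega

-- B's outer loop is the 100-capped (here r-capped) flatten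
theorem altOuter_eq (apistats : List (String × List (String × Int))) :
    ∀ (l : List (String × List (String × Int))) (gl : List String) (r : Int), 0 ≤ r →
      altOuter apistats l gl r = gl ++ (outerFlat apistats l).take r.toNat := by
  intro l
  induction l with
  | nil => intro gl r hr; simp [altOuter, outerFlat]
  | cons p rest ih =>
      intro gl r hr
      simp only [altOuter, outerFlat, List.flatMap_cons]
      cases hp : pyLookup apistats p.1 with
      | none =>
          rw [ih gl r hr]; simp [outerFlat]
      | some api_json =>
          dsimp only; rw [altInner_eq api_json api_json gl r hr]
          set F := innerFlat api_json api_json with hF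
          by_cases hz : r - ((F.length ⊓ r.toNat : ℕ) : Int) = 0
          · rw [if_pos hz]
            have hle : r.toNat ≤ F.length := by omega
            rw [List.take_append]
            simp [Nat.sub_eq_zero_of_le hle]
          · rw [if_neg hz, ih _ _ (by omega)]
            have hlt : F.length < r.toNat := by omega
            have h1 : (r - ((F.length ⊓ r.toNat : ℕ) : Int)).toNat = r.toNat - F.length := by omega
            rw [List.take_append]
            simp [List.take_of_length_le (le_of_lt hlt), List.append_assoc, h1,
                  Nat.min_eq_left (le_of_lt hlt), outerFlat]

-- ===== VERDICT (by name: the statement is the Claim_ definition above) =====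
theorem create_api_features_spec : Claim_equal_create_api_features := by
  intro behavior_json maxnum _ _
  unfold Spec_create_api_features create_api_features create_api_features_alt
  cases pyLookup behavior_json "apistats" with
  | none => rfl
  | some apistats =>
      simp only []
      rw [get_list_eq apistats, altOuter_eq apistats apistats [] 100 (by norm_num)]
      simp
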